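-- pv_equiv track=rewrite | github.com/mosdef-hub/Grouper | Grouper/fragmentation.py | _get_hubs_from_string
-- ===== SOURCE A (Python) =====
-- def _get_hubs_from_string(pattern):
--     letterIndex = 0
--     hubs = []
--     charValencyMap = {
--         "C": 4,
--         "N": 3,
--         "O": 2,
--         "F": 1,
--         "P": 3,
--         "B": 3,
--         "Cl": 1,
--         "I": 1,
--         "Li": 1,
--         "Si": 4,
--         "S": 2,
--         "Se": 2,
--         "Br": 1,
--         "H": 1,
--     }
--
--     # main working loop
--     # subtract 1 from charValencyMap since only looking for hubs to potential groups outside of the group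
--     # at minimum there is 1 bond within the group
--     for char1, char2 in zip(pattern, pattern[1:]):
--         if (
--             char1 + char2 in charValencyMap
--         ):  # matched a pair of two letters, so don't match on just a single letter
--             hubs.extend([letterIndex for _ in range(charValencyMap[char1 + char2] - 1)])
--             letterIndex += 1
--         elif char1 in charValencyMap:  # matched a single letter
--             hubs.extend([letterIndex for _ in range(charValencyMap[char1] - 1)])
--             letterIndex += 1
--     # handle last string
--     if pattern[-1] in charValencyMap:
--         if pattern[-1] in charValencyMap:
--             hubs.extend([letterIndex for _ in range(charValencyMap[pattern[-1]] - 1)])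
--             letterIndex += 1
--
--     # handle edge case where only 1 atom in pattern, so no -1 in pattern:
--     if letterIndex == 1:
--         hubs.append(0)  # add in one more possible bonding state
--
--     return hubs
-- ===== SOURCE B (Python) =====
-- def _get_hubs_from_string(pattern):
--     charValencyMap = {
--         "C": 4, "N": 3, "O": 2, "F": 1, "P": 3, "B": 3, "Cl": 1,
--         "I": 1, "Li": 1, "Si": 4, "S": 2, "Se": 2, "Br": 1, "H": 1,
--     }
--     # greedy tokenizer: consume a two-character symbol (skipping its second
--     # character) or a single-character symbol, collecting valencies
--     valencies = []
--     i = 0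
--     n = len(pattern)
--     while i < n:
--         if i + 1 < n and pattern[i:i + 2] in charValencyMap:
--             valencies.append(charValencyMap[pattern[i:i + 2]])
--             i += 2
--         elif pattern[i] in charValencyMap:
--             valencies.append(charValencyMap[pattern[i]])
--             i += 1
--         else:
--             i += 1
--     hubs = [j for j, v in enumerate(valencies) for _ in range(v - 1)]
--     if len(valencies) == 1:
--         hubs.append(0)
--     return hubs
-- ===== Notes on version B (the rewrite author's own statement) =====
-- stated objective: alternative
-- what changed: A scans every position via zip over adjacent character pairs (extending hubs inline) plus a separate last-character step; B is a greedy tokenizer with a single moving cursor that consumes a two-character symbol (skipping its second character, which can never start another match) or one character at a time, collecting valencies that a separate phase expands into hub indices.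
-- crash fix: On the empty string A raises IndexError at pattern[-1]; B returns []. — e.g. on _get_hubs_from_string(""): A raises IndexError, B returns []
import Mathlib
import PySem

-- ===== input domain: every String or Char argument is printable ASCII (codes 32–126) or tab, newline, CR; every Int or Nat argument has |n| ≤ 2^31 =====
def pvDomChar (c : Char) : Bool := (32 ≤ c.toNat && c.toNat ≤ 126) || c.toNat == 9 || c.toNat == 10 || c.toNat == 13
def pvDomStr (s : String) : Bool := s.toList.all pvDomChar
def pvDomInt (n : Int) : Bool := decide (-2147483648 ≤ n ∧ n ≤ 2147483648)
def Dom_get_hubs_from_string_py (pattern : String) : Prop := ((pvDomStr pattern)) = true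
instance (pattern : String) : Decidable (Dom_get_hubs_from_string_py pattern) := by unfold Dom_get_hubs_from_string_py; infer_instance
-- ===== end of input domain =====

-- B replaces A's every-position zip-over-pairs scan (plus separate last-character step)
-- by a greedy tokenizer: a single cursor that consumes a two-character symbol (skipping
-- its second character) or one character at a time, collecting valencies, expanded into
-- hub indices in a separate phase; objective: alternative (different traversal).

-- shared constant table (plain data, used by both ports)
def charValencyMap : PySem.Dict String Int :=
  PySem.Dict.ofList
  [("C", 4), ("N", 3), ("O", 2), ("F", 1), ("P", 3), ("B", 3), ("Cl", 1),
   ("I", 1), ("Li", 1), ("Si", 4), ("S", 2), ("Se", 2), ("Br", 1), ("H", 1)]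

-- ===== PORT A =====
-- the `for char1, char2 in zip(pattern, pattern[1:])` loop, state (letterIndex, hubs)
def aLoop : List (Char × Char) → Int → List Int → Int × List Int
  | [], li, hubs => (li, hubs)
  | (c1, c2) :: rest, li, hubs =>
    match PySem.Dict.get? charValencyMap (String.ofList [c1, c2]) with
    | some v => aLoop rest (li + 1) (hubs ++ (PySem.List.pyRange 0 (v - 1)).map (fun _ => li))
    | none =>
      match PySem.Dict.get? charValencyMap (String.ofList [c1]) with
      | some v => aLoop rest (li + 1) (hubs ++ (PySem.List.pyRange 0 (v - 1)).map (fun _ => li))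
      | none => aLoop rest li hubs

def get_hubs_from_string_py (pattern : String) : List Int :=
  let cs := pattern.toList
  let st := aLoop (cs.zip (PySem.List.slice cs (some 1) none)) 0 []
  match PySem.List.pyGet? cs (-1) with
  | none => st.2      -- pattern[-1] raises IndexError on the empty string (excluded by Pre_)
  | some c =>
    let st' : Int × List Int :=
      match PySem.Dict.get? charValencyMap (String.ofList [c]) with
      | some v => (st.1 + 1, st.2 ++ (PySem.List.pyRange 0 (v - 1)).map (fun _ => st.1))
      | none => st
    if st'.1 = 1 then st'.2 ++ [0] else st'.2

-- ===== PORT B =====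
-- Source B's `while i < n` tokenizer: the remaining characters are the suffix from the
-- cursor; a two-character match advances the cursor by 2, otherwise it advances by 1.
def bLoop : List Char → List Int
  | [] => []
  | [c] =>
    match PySem.Dict.get? charValencyMap (String.ofList [c]) with
    | some v => [v]
    | none => []
  | c1 :: c2 :: t =>
    match PySem.Dict.get? charValencyMap (String.ofList [c1, c2]) with
    | some v => v :: bLoop t
    | none =>
      match PySem.Dict.get? charValencyMap (String.ofList [c1]) with
      | some v => v :: bLoop (c2 :: t)
      | none => bLoop (c2 :: t)

def get_hubs_from_string_py_alt (pattern : String) : List Int :=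
  let valencies := bLoop pattern.toList
  let hubs := (PySem.List.enumerate valencies).flatMap
    (fun jv => (PySem.List.pyRange 0 (jv.2 - 1)).map (fun _ => jv.1))
  if valencies.length = 1 then hubs ++ [0] else hubs

-- ===== PRECONDITION & SPEC =====
-- Pre_ excludes exactly the empty string, where A raises IndexError on pattern[-1].
def Pre_get_hubs_from_string_py (pattern : String) : Prop := pattern.toList ≠ []
instance (pattern : String) : Decidable (Pre_get_hubs_from_string_py pattern) := by
  unfold Pre_get_hubs_from_string_py; infer_instance

def pvWitness_get_hubs_from_string_py : String := "CSe"

-- A raises IndexError on the empty string; B returns [].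
def Raises_get_hubs_from_string_py (pattern : String) : Prop := pattern.toList = []
instance (pattern : String) : Decidable (Raises_get_hubs_from_string_py pattern) := by
  unfold Raises_get_hubs_from_string_py; infer_instance
def pvRaiseWitness_get_hubs_from_string_py : String := ""
def pvRaiseWitnessOut_get_hubs_from_string_py : List Int := []

def Spec_get_hubs_from_string_py (pattern : String) (out : List Int) : Prop :=
  out = get_hubs_from_string_py_alt pattern
instance (pattern : String) (out : List Int) : Decidable (Spec_get_hubs_from_string_py pattern out) := by
  unfold Spec_get_hubs_from_string_py; infer_instance

-- ===== CLAIM (what is proved, stated in full; the proofs are below) =====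
def Claim_equal_get_hubs_from_string_py : Prop :=
  ∀ (pattern : String), Dom_get_hubs_from_string_py pattern →
    Pre_get_hubs_from_string_py pattern →
    Spec_get_hubs_from_string_py pattern (get_hubs_from_string_py pattern)

def Claim_raises_get_hubs_from_string_py : Prop :=
  (∀ (pattern : String), Dom_get_hubs_from_string_py pattern →
      Raises_get_hubs_from_string_py pattern → ¬ Pre_get_hubs_from_string_py pattern) ∧
  (Dom_get_hubs_from_string_py (pvRaiseWitness_get_hubs_from_string_py) ∧
   Raises_get_hubs_from_string_py (pvRaiseWitness_get_hubs_from_string_py) ∧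
   get_hubs_from_string_py_alt (pvRaiseWitness_get_hubs_from_string_py) =
     pvRaiseWitnessOut_get_hubs_from_string_py)

-- ===== LEMMAS AND PROOFS =====

-- characterisation of the table lookups on one- and two-character keys
theorem str_eq_ofList (s : String) (l : List Char) : (s = String.ofList l) ↔ s.toList = l := by
  constructor
  · intro h; rw [h]; simp
  · intro h; apply String.toList_injective; simpa using h

theorem cvm_mk : charValencyMap = PySem.Dict.mk
    [("C", 4), ("N", 3), ("O", 2), ("F", 1), ("P", 3), ("B", 3), ("Cl", 1),
     ("I", 1), ("Li", 1), ("Si", 4), ("S", 2), ("Se", 2), ("Br", 1), ("H", 1)] := by decide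

theorem get?_nil (s : String) : (PySem.Dict.mk ([] : List (String × Int))).get? s = none := rfl

theorem get2 (c1 c2 : Char) :
  PySem.Dict.get? charValencyMap (String.ofList [c1, c2]) =
    if 'C' = c1 ∧ 'l' = c2 then some 1
    else if 'L' = c1 ∧ 'i' = c2 then some 1
    else if 'S' = c1 ∧ 'i' = c2 then some 4
    else if 'S' = c1 ∧ 'e' = c2 then some 2
    else if 'B' = c1 ∧ 'r' = c2 then some 1
    else none := by
  rw [cvm_mk]
  simp [PySem.Dict.get?_mk_cons, str_eq_ofList, get?_nil]

-- second characters of two-character symbols match nothing in the table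
theorem dead_of_pair (c1 c2 : Char) (v : Int)
    (h : PySem.Dict.get? charValencyMap (String.ofList [c1, c2]) = some v) :
    c2 = 'l' ∨ c2 = 'i' ∨ c2 = 'e' ∨ c2 = 'r' := by
  rw [get2] at h
  split_ifs at h with h1 h2 h3 h4 h5 <;> tauto

theorem look1_dead (c : Char) (h : c = 'l' ∨ c = 'i' ∨ c = 'e' ∨ c = 'r') :
    PySem.Dict.get? charValencyMap (String.ofList [c]) = none := by
  rcases h with rfl | rfl | rfl | rfl <;> decide

theorem pair_dead (c2 c3 : Char) (h : c2 = 'l' ∨ c2 = 'i' ∨ c2 = 'e' ∨ c2 = 'r') :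
    PySem.Dict.get? charValencyMap (String.ofList [c2, c3]) = none := by
  rw [get2]
  rcases h with rfl | rfl | rfl | rfl <;> simp

-- the single-character lookup, as the list of matched valencies (empty or singleton)
def look1 (c : Char) : List Int :=
  match PySem.Dict.get? charValencyMap (String.ofList [c]) with
  | some v => [v]
  | none => []

-- the pair-position lookup: two-character key first, else single character
def look2 (c1 c2 : Char) : List Int :=
  match PySem.Dict.get? charValencyMap (String.ofList [c1, c2]) with
  | some v => [v]
  | none => look1 c1

-- valencies collected by A's pair loop only (all positions but the last)
def valsP : List Char → List Int
  | [] => []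
  | [_] => []
  | c1 :: c2 :: t => look2 c1 c2 ++ valsP (c2 :: t)

-- all valencies A collects, last character included
def vals : List Char → List Int
  | [] => []
  | [c] => look1 c
  | c1 :: c2 :: t => look2 c1 c2 ++ vals (c2 :: t)

-- expansion of a valency list into hub indices starting at offset `off`
def expand (off : Int) : List Int → List Int
  | [] => []
  | v :: vs => List.replicate (v - 1).toNat off ++ expand (off + 1) vs

theorem rep_lemma (m j : Int) :
    (PySem.List.pyRange 0 m).map (fun _ => j) = List.replicate m.toNat j := by
  by_cases h : m ≤ 0
  · have h0 : m.toNat = 0 := Int.toNat_of_nonpos h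
    simp [PySem.List.pyRange, h0, Int.not_lt.mpr h]
  · replace h : 0 < m := by omega
    obtain ⟨n, rfl⟩ : ∃ n : Nat, m = n := ⟨m.toNat, (Int.toNat_of_nonneg h.le).symm⟩
    rw [PySem.List.pyRange_zero_natCast, List.map_map]
    simp [Function.comp_def, List.map_const']

theorem expand_append (xs ys : List Int) (off : Int) :
    expand off (xs ++ ys) = expand off xs ++ expand (off + xs.length) ys := by
  induction xs generalizing off with
  | nil => simp [expand]
  | cons v t ih => simp [expand, ih, List.append_assoc]; ring_nf

theorem enumerate_expand (vs : List Int) (k : Int) :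
    (PySem.List.enumerate vs k).flatMap
      (fun jv => (PySem.List.pyRange 0 (jv.2 - 1)).map (fun _ => jv.1)) = expand k vs := by
  induction vs generalizing k with
  | nil => simp [PySem.List.enumerate, expand]
  | cons v t ih =>
    simp only [PySem.List.enumerate, List.flatMap_cons]
    rw [rep_lemma, ih]
    rfl

-- ----- A's scan computes `vals` -----
theorem aLoop_cons (c1 c2 : Char) (rest : List (Char × Char)) (li : Int) (hubs : List Int) :
    aLoop ((c1, c2) :: rest) li hubs =
      aLoop rest (li + (look2 c1 c2).length) (hubs ++ expand li (look2 c1 c2)) := by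
  rw [aLoop.eq_def]
  rcases h2 : PySem.Dict.get? charValencyMap (String.ofList [c1, c2]) with _ | v
  · rcases h1 : PySem.Dict.get? charValencyMap (String.ofList [c1]) with _ | v
    · simp [look2, look1, h2, h1, expand]
    · simp [look2, look1, h2, h1, expand]
  · simp [look2, h2, expand]

theorem aLoop_spec (cs : List Char) (li : Int) (hubs : List Int) :
    aLoop (cs.zip (cs.drop 1)) li hubs =
      (li + (valsP cs).length, hubs ++ expand li (valsP cs)) := by
  induction cs generalizing li hubs with
  | nil => simp [aLoop, valsP, expand]
  | cons c1 t ih =>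
    cases t with
    | nil => simp [aLoop, valsP, expand]
    | cons c2 t' =>
      have hz : (c1 :: c2 :: t').zip (List.drop 1 (c1 :: c2 :: t')) =
          (c1, c2) :: ((c2 :: t').zip (List.drop 1 (c2 :: t'))) := rfl
      rw [hz, aLoop_cons, ih]
      show _ = ((li + ((look2 c1 c2 ++ valsP (c2 :: t')).length : Int)),
        hubs ++ expand li (look2 c1 c2 ++ valsP (c2 :: t')))
      rw [expand_append]
      simp [Prod.ext_iff, List.append_assoc]
      ring

theorem vals_decomp (cs : List Char) :
    vals cs = valsP cs ++ (match cs.getLast? with | some c => look1 c | none => []) := by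
  induction cs with
  | nil => simp [vals, valsP]
  | cons c1 t ih =>
    cases t with
    | nil => simp [vals, valsP]
    | cons c2 t' =>
      show look2 c1 c2 ++ vals (c2 :: t') = (look2 c1 c2 ++ valsP (c2 :: t')) ++ _
      rw [ih, List.append_assoc]
      rfl

theorem pyGet_neg_one (cs : List Char) (h : cs ≠ []) :
    PySem.List.pyGet? cs (-1) = cs.getLast? := by
  have hn : 0 < cs.length := List.length_pos_iff.mpr h
  rw [List.getLast?_eq_getElem?]
  simp only [PySem.List.pyGet?, PySem.List.pyIdx?]
  have h2 : -(cs.length : Int) ≤ -1 := by omega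
  simp [h2]

-- ----- B's tokenizer computes `vals` too -----
-- a dead character at the head contributes nothing to A's scan
theorem vals_dead (c : Char) (t : List Char) (h : c = 'l' ∨ c = 'i' ∨ c = 'e' ∨ c = 'r') :
    vals (c :: t) = vals t := by
  cases t with
  | nil => simp [vals, look1, look1_dead c h]
  | cons c3 t' =>
    show look2 c c3 ++ vals (c3 :: t') = vals (c3 :: t')
    simp [look2, look1, pair_dead c c3 h, look1_dead c h]

theorem bLoop_eq_vals (cs : List Char) : bLoop cs = vals cs := by
  match cs with
  | [] => rfl
  | [c] => simp [bLoop, vals, look1]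
  | c1 :: c2 :: t =>
    rcases h2 : PySem.Dict.get? charValencyMap (String.ofList [c1, c2]) with _ | v
    · rcases h1 : PySem.Dict.get? charValencyMap (String.ofList [c1]) with _ | v <;>
        simp [bLoop, vals, look2, look1, h2, h1, bLoop_eq_vals (c2 :: t)]
    · have hd := dead_of_pair c1 c2 v h2
      simp [bLoop, vals, look2, h2, bLoop_eq_vals t, vals_dead c2 t hd]
termination_by cs.length

-- ----- both ports in the same canonical form -----
theorem alt_eq (pattern : String) :
    get_hubs_from_string_py_alt pattern =
      (if (vals pattern.toList).length = 1
       then expand 0 (vals pattern.toList) ++ [0]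
       else expand 0 (vals pattern.toList)) := by
  unfold get_hubs_from_string_py_alt
  dsimp only
  rw [enumerate_expand, bLoop_eq_vals]

theorem a_eq (pattern : String) (h : pattern.toList ≠ []) :
    get_hubs_from_string_py pattern =
      (if (vals pattern.toList).length = 1
       then expand 0 (vals pattern.toList) ++ [0]
       else expand 0 (vals pattern.toList)) := by
  unfold get_hubs_from_string_py
  dsimp only
  have hs : PySem.List.slice pattern.toList (some 1) none = pattern.toList.drop 1 :=
    PySem.List.slice_from _ (by norm_num)
  rw [hs, aLoop_spec, pyGet_neg_one _ h]
  obtain ⟨c, hc⟩ : ∃ c, pattern.toList.getLast? = some c :=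
    Option.isSome_iff_exists.mp (List.getLast?_isSome.mpr h)
  rw [hc]
  have hv : vals pattern.toList = valsP pattern.toList ++ look1 c := by
    rw [vals_decomp, hc]
  rcases h1 : PySem.Dict.get? charValencyMap (String.ofList [c]) with _ | v
  · have hl : look1 c = [] := by simp [look1, h1]
    simp only [h1]
    rw [hv, hl, List.append_nil]
    by_cases hlen : (valsP pattern.toList).length = 1 <;> simp [hlen]
  · have hl : look1 c = [v] := by simp [look1, h1]
    simp only [h1]
    rw [hv, hl, expand_append]
    by_cases hlen : (valsP pattern.toList).length = 0
    · simp [hlen, expand]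
    · simp [expand]

-- ===== VERDICT (by name: the statement is the Claim_ definition above) =====
theorem get_hubs_from_string_py_spec : Claim_equal_get_hubs_from_string_py := by
  intro pattern _ hpre
  unfold Spec_get_hubs_from_string_py
  rw [a_eq pattern hpre, alt_eq pattern]

@[simp]
theorem get_hubs_from_string_py_raises : Claim_raises_get_hubs_from_string_py := by
  unfold Claim_raises_get_hubs_from_string_py
  exact ⟨fun p _ hr => by simpa [Pre_get_hubs_from_string_py, Raises_get_hubs_from_string_py] using hr,
         by decide⟩
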